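-- pv_equiv track=rewrite | github.com/vimalanignatius/unsorted-array | print5oddnumbers.py | odd
-- ===== SOURCE A (Python) =====
-- def odd(n):
--     odd=1
--     count=0
--     oddnumber=[]
--     while(count<n):
--         if(odd%2==1):
--             oddnumber.append(odd)
--             count=len(oddnumber)
--         odd+=1
--     if(n<0):
--         return" no odd"
--     return oddnumber
-- ===== SOURCE B (Python) =====
-- def odd(n):
--     return [2 * i + 1 for i in range(n)]
-- ===== Notes on version B (the rewrite author's own statement) =====
-- stated objective: simpler
-- what changed: Replaces the scan over every integer with a parity test by a comprehension that emits each odd directly from its position, so no modulo test and half the iterations.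
-- outside the precondition, e.g. on odd(-1): A returns ' no odd', B returns []
import Mathlib
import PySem

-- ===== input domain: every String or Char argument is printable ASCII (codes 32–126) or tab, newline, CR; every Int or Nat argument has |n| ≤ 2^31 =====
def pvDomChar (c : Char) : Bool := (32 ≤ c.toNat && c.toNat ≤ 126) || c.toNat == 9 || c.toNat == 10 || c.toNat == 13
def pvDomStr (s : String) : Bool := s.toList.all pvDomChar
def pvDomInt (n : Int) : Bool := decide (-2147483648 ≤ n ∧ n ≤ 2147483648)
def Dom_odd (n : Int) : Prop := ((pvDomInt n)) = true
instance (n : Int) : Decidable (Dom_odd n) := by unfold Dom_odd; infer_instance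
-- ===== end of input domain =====

-- B generates each odd directly by its position instead of scanning all integers with a parity test.

-- ===== PORT A =====
-- the while loop, fuel-totalized: 2*n.toNat iterations always suffice (odd reaches 2n-1 and count hits n)
def oddLoop (fuel : Nat) (n : Int) (oddv : Int) (count : Int) (oddnumber : List Int) : List Int :=
  match fuel with
  | 0 => oddnumber
  | fuel + 1 =>
    if count < n then
      if PySem.Int.mod oddv 2 == 1 then
        oddLoop fuel n (oddv + 1) ((oddnumber ++ [oddv]).length : Int) (oddnumber ++ [oddv])
      else
        oddLoop fuel n (oddv + 1) count oddnumber
    else oddnumber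

-- for n < 0 the Python returns the string " no odd" (not a list); Pre_odd excludes those inputs
def odd (n : Int) : List Int := oddLoop (2 * n.toNat) n 1 0 []

-- ===== PORT B =====
def odd_alt (n : Int) : List Int := (PySem.List.pyRange 0 n 1).map (fun i => 2 * i + 1)

-- ===== PRECONDITION & SPEC =====
-- Pre_ excludes n < 0, where A returns the string " no odd" instead of a list of ints.
def Pre_odd (n : Int) : Prop := 0 ≤ n
instance (n : Int) : Decidable (Pre_odd n) := by unfold Pre_odd; infer_instance
def pvWitness_odd : Int := (3)

def Spec_odd (n : Int) (out : List Int) : Prop := out = odd_alt n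
instance (n : Int) (out : List Int) : Decidable (Spec_odd n out) := by unfold Spec_odd; infer_instance

-- ===== CLAIM (what is proved, stated in full; the proofs are below) =====
def Claim_equal_odd : Prop := ∀ (n : Int), Dom_odd n → Pre_odd n → Spec_odd n (odd n)

-- ===== LEMMAS AND PROOFS =====

lemma oddLoop_eq (k : Nat) : ∀ (n c : Int) (acc : List Int),
    n - c ≤ (k : Int) → (acc.length : Int) = c →
    oddLoop (2 * k) n (2 * c + 1) c acc = acc ++ (PySem.List.pyRange c n 1).map (fun i => 2 * i + 1) := by
  induction k with
  | zero =>
    intro n c acc hk _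
    rw [PySem.List.pyRange_one_eq_nil (by omega)]
    simp [oddLoop]
  | succ k ih =>
    intro n c acc hk hacc
    by_cases h : c < n
    · have hmod : PySem.Int.mod (2 * c + 1) 2 = 1 := by
        rw [PySem.Int.mod_eq_emod_of_pos (by omega : (0:Int) < 2)]; omega
      have step1 : 2 * (k + 1) = (2 * k + 1) + 1 := by ring
      rw [step1]
      simp only [oddLoop, if_pos h, hmod]
      simp only [beq_self_eq_true, if_pos]
      by_cases h2 : c + 1 < n
      · have hlen : ((acc ++ [2 * c + 1]).length : Int) = c + 1 := by
          simp only [List.length_append, List.length_cons, List.length_nil]; push_cast; omega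
        rw [if_pos (by rw [hlen]; exact h2)]
        have hmod2 : (PySem.Int.mod (2 * c + 1 + 1) 2 == 1) = false := by
          rw [PySem.Int.mod_eq_emod_of_pos (by omega : (0:Int) < 2)]
          simp; omega
        rw [hmod2]
        simp only [if_neg Bool.false_ne_true]
        have : (2 : Int) * c + 1 + 1 + 1 = 2 * (c + 1) + 1 := by ring
        rw [hlen, this, ih n (c + 1) (acc ++ [2 * c + 1]) (by omega) hlen]
        rw [PySem.List.pyRange_one_cons h]
        simp
      · -- n = c + 1 : one more append then the guard fails
        have hn : n = c + 1 := by omega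
        have hlen : ((acc ++ [2 * c + 1]).length : Int) = c + 1 := by
          simp only [List.length_append, List.length_cons, List.length_nil]; push_cast; omega
        rw [if_neg (by rw [hlen]; omega)]
        rw [hn, PySem.List.pyRange_one_singleton]
        simp
    · rw [PySem.List.pyRange_one_eq_nil (by omega)]
      simp [oddLoop, if_neg h]

-- ===== VERDICT (by name: the statement is the Claim_ definition above) =====
theorem odd_spec : Claim_equal_odd := by
  intro n _ hpre
  unfold Spec_odd odd odd_alt
  have h := oddLoop_eq n.toNat n 0 [] (by omega) (by simp)
  simpa using h
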